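-- pv_equiv track=rewrite | github.com/cryssoft/sudoku_solvers | solver-001.py | return_unique_cell_solution
-- ===== SOURCE A (Python) =====
-- def return_unique_cell_solution(p_mask: int) -> int:
--     """
--     Use the bit mask computed above.  If there's exactly one zero bit (a unique
--     solution for this cell), then return it.  Otherwise, return -1 (empty) since we
--     have no unique solution for this cell yet.
--
--     0.0.1 - Initial version w/ int | None returns
--     0.0.2 - Simplify to leave -1s alone if no unique solution
--     """
--     l_count_of_zeroes: int = 0
--     l_returns: int = -1
--
--     for l_bit_value in [1 << x for x in range(0,9)]:
--         if ((p_mask & l_bit_value) == 0):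
--             l_count_of_zeroes += 1
--             l_returns = l_bit_value
--     if (l_count_of_zeroes != 1):
--         l_returns = -1
--
--     return(l_returns)
-- ===== SOURCE B (Python) =====
-- def return_unique_cell_solution(p_mask: int) -> int:
--     """Closed-form: invert the low 9 bits and test for a single set bit."""
--     inv = ~p_mask & 0x1FF
--     return inv if inv and not (inv & (inv - 1)) else -1
-- ===== Notes on version B (the rewrite author's own statement) =====
-- stated objective: idiomatic
-- what changed: Replaced A's fixed per-bit scan that counts zero bits and remembers the last one with a closed-form computation: complement the mask's low bits and return that value iff it is a single power of two, else minus one.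
import Mathlib
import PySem

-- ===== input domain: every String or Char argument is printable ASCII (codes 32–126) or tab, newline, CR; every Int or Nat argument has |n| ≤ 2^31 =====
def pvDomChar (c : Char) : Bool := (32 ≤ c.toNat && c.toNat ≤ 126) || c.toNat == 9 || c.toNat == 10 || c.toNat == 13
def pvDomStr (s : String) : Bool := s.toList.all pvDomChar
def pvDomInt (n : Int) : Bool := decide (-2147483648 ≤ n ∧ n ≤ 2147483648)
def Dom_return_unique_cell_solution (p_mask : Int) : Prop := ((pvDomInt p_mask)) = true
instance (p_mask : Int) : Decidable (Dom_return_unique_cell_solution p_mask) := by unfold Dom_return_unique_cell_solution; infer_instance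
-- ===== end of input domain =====

-- B replaces A's 9-step scan-and-count loop with a closed-form bit trick (invert the
-- low 9 bits, test for a single set bit); objective: a more idiomatic O(1) formulation.

-- ===== PORT A =====
-- literal port of A: scan the nine bit values, counting zero bits and remembering the
-- last one seen; x from range(0,9) is nonnegative, so `1 << x` is `1 <<< x.toNat` exactly
def return_unique_cell_solution (p_mask : Int) : Int :=
  let bits : List Int := (PySem.List.pyRange 0 9 1).map (fun x => (1 : Int) <<< x.toNat)
  let st := bits.foldl
    (fun (st : Int × Int) b => if PySem.Int.band p_mask b == 0 then (st.1 + 1, b) else st)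
    ((0 : Int), (-1 : Int))
  if st.1 ≠ 1 then -1 else st.2

-- ===== PORT B =====
-- literal port of Source B: inv = ~p_mask & 0x1FF; return inv if inv and not (inv & (inv-1)) else -1
def return_unique_cell_solution_alt (p_mask : Int) : Int :=
  let inv := PySem.Int.band (Int.not p_mask) 0x1FF
  if inv ≠ 0 ∧ PySem.Int.band inv (inv - 1) == 0 then inv else -1

-- ===== PRECONDITION & SPEC =====
def Spec_return_unique_cell_solution (p_mask : Int) (out : Int) : Prop := out = return_unique_cell_solution_alt p_mask
instance (p_mask : Int) (out : Int) : Decidable (Spec_return_unique_cell_solution p_mask out) := by unfold Spec_return_unique_cell_solution; infer_instance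

-- ===== CLAIM (what is proved, stated in full; the proofs are below) =====
def Claim_equal_return_unique_cell_solution : Prop := ∀ (p_mask : Int), Dom_return_unique_cell_solution p_mask → Spec_return_unique_cell_solution p_mask (return_unique_cell_solution p_mask)

-- ===== LEMMAS AND PROOFS =====

-- complementing within a 9-bit mask flips every tested low bit
theorem pv_testBit_compl : ∀ m, m < 512 → ∀ x, x < 9 → (511 - m).testBit x = !(m.testBit x) := by
  set_option maxRecDepth 4000 in decide

-- `a & (1 << x)` only reads bit x, which survives reduction mod 512 when x < 9
theorem pv_band_low (a : Int) (x : Nat) (hx : x < 9) :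
    PySem.Int.band a (((2 ^ x : Nat) : Int)) = PySem.Int.band (a % 512) (((2 ^ x : Nat) : Int)) := by
  have hmodbit : ∀ n : Nat, (n % 512).testBit x = n.testBit x := by
    intro n
    have h512 : (512 : Nat) = 2 ^ 9 := by norm_num
    rw [h512, Nat.testBit_mod_two_pow]
    simp [hx]
  by_cases ha : 0 ≤ a
  · obtain ⟨n, rfl⟩ := Int.eq_ofNat_of_zero_le ha
    have h1 : ((n : Int) % 512) = ((n % 512 : Nat) : Int) := by omega
    rw [h1, PySem.Int.band_natCast, PySem.Int.band_natCast]
    congr 1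
    rw [Nat.and_two_pow, Nat.and_two_pow, hmodbit]
  · set n : Nat := (-a - 1).toNat with hn
    have hna : (n : Int) = -a - 1 := by omega
    have hr : a % 512 = (((511 - n % 512 : Nat)) : Int) := by omega
    have hLHS : PySem.Int.band a (((2 ^ x : Nat) : Int)) = ((2 ^ x - (2 ^ x &&& n) : Nat) : Int) := by
      simp only [PySem.Int.band]
      rw [if_neg (by omega), if_pos (by positivity)]
      congr 2
    rw [hLHS, hr, PySem.Int.band_natCast]
    congr 1
    rw [Nat.two_pow_and, Nat.and_two_pow,
        pv_testBit_compl (n % 512) (Nat.mod_lt _ (by norm_num)) x hx, hmodbit]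
    cases h : n.testBit x <;> simp
  
-- `a & 0x1FF` is reduction mod 512 (Python semantics: floor mod, here divisor 512 > 0)
theorem pv_band_mask (a : Int) : PySem.Int.band a 511 = a % 512 := by
  have hand : ∀ n : Nat, n &&& 511 = n % 512 := by
    intro n
    have := Nat.and_two_pow_sub_one_eq_mod n 9
    norm_num at this
    omega
  by_cases ha : 0 ≤ a
  · simp only [PySem.Int.band]
    rw [if_pos ha, if_pos (by norm_num)]
    have : (511 : Int).toNat = 511 := by decide
    rw [this, hand]
    omega
  · simp only [PySem.Int.band]
    rw [if_neg (by omega), if_pos (by norm_num)]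
    have h1 : (511 : Int).toNat = 511 := by decide
    rw [h1, Nat.and_comm, hand]
    have h2 : (-a - 1).toNat % 512 < 512 := Nat.mod_lt _ (by norm_num)
    omega

theorem pv_A_reduce (p : Int) :
    return_unique_cell_solution p = return_unique_cell_solution (p % 512) := by
  simp only [return_unique_cell_solution]
  have hbits : (PySem.List.pyRange 0 9 1).map (fun x => (1 : Int) <<< x.toNat)
      = [1, 2, 4, 8, 16, 32, 64, 128, 256] := by decide
  rw [hbits]
  have hcong := PySem.List.foldl_congr_mem
    ([1, 2, 4, 8, 16, 32, 64, 128, 256] : List Int)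
    (fun (st : Int × Int) b => if PySem.Int.band p b == 0 then (st.1 + 1, b) else st)
    (fun (st : Int × Int) b => if PySem.Int.band (p % 512) b == 0 then (st.1 + 1, b) else st)
    ((0 : Int), (-1 : Int))
    (by
      intro acc b hb
      have hband : PySem.Int.band p b = PySem.Int.band (p % 512) b := by
        simp only [List.mem_cons, List.not_mem_nil, or_false] at hb
        rcases hb with rfl | rfl | rfl | rfl | rfl | rfl | rfl | rfl | rfl
        · exact_mod_cast pv_band_low p 0 (by norm_num)
        · exact_mod_cast pv_band_low p 1 (by norm_num)
        · exact_mod_cast pv_band_low p 2 (by norm_num)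
        · exact_mod_cast pv_band_low p 3 (by norm_num)
        · exact_mod_cast pv_band_low p 4 (by norm_num)
        · exact_mod_cast pv_band_low p 5 (by norm_num)
        · exact_mod_cast pv_band_low p 6 (by norm_num)
        · exact_mod_cast pv_band_low p 7 (by norm_num)
        · exact_mod_cast pv_band_low p 8 (by norm_num)
      simp [hband])
  rw [hcong]

theorem pv_not_eq (p : Int) : Int.not p = -p - 1 := by
  cases p with
  | ofNat n => simp [Int.not, Int.negSucc_eq]; ring
  | negSucc n => simp [Int.not, Int.negSucc_eq]; try ring

theorem pv_B_reduce (p : Int) :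
    return_unique_cell_solution_alt p = return_unique_cell_solution_alt (p % 512) := by
  simp only [return_unique_cell_solution_alt]
  have hinv : PySem.Int.band (Int.not p) 0x1FF = PySem.Int.band (Int.not (p % 512)) 0x1FF := by
    show PySem.Int.band (Int.not p) 511 = PySem.Int.band (Int.not (p % 512)) 511
    rw [pv_band_mask, pv_band_mask, pv_not_eq, pv_not_eq]
    omega
  rw [hinv]

set_option maxRecDepth 20000 in
theorem pv_all512 : ∀ m : Fin 512,
    return_unique_cell_solution ((m : Nat) : Int) = return_unique_cell_solution_alt ((m : Nat) : Int) := by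
  decide

-- ===== VERDICT (by name: the statement is the Claim_ definition above) =====
theorem return_unique_cell_solution_spec : Claim_equal_return_unique_cell_solution := by
  intro p _
  unfold Spec_return_unique_cell_solution
  rw [pv_A_reduce p, pv_B_reduce p]
  have h0 : 0 ≤ p % 512 := by omega
  have h1 : p % 512 < 512 := by omega
  have h := pv_all512 ⟨(p % 512).toNat, by omega⟩
  simpa [Int.toNat_of_nonneg h0] using h
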